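-- pv_equiv track=rewrite | github.com/IggyIkenna/unified-trading-system-ui | _reference/deployment-api/deployment_api/utils/deployment_state_reader.py | _compute_effective_status
-- ===== SOURCE A (Python) =====
-- def _compute_effective_status(shards: list[dict[str, object]]) -> str:
--     """Derive effective deployment status from shard statuses."""
--     running = sum(1 for s in shards if s.get("status") == "running")
--     pending = sum(1 for s in shards if s.get("status") == "pending")
--     failed = sum(1 for s in shards if s.get("status") == "failed")
--     if running > 0:
--         return "running"
--     if pending > 0:
--         return "pending"
--     if failed > 0:
--         return "failed"
--     return "completed"
-- ===== SOURCE B (Python) =====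
-- _RANK = {"running": 3, "pending": 2, "failed": 1}
-- _NAME = ("completed", "failed", "pending", "running")
--
--
-- def _compute_effective_status(shards: list[dict[str, object]]) -> str:
--     """Derive effective deployment status from shard statuses.
--
--     Single pass: keep the maximum severity rank seen so far, then map it back.
--     """
--     best = 0
--     for s in shards:
--         best = max(best, _RANK.get(s.get("status"), 0))
--     return _NAME[best]
-- ===== Notes on version B (the rewrite author's own statement) =====
-- stated objective: alternative
-- what changed: Replaces A's three separate counting passes plus a priority if-chain by a single fold that maintains one maximum severity rank and maps it back to a status name.
import Mathlib
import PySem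

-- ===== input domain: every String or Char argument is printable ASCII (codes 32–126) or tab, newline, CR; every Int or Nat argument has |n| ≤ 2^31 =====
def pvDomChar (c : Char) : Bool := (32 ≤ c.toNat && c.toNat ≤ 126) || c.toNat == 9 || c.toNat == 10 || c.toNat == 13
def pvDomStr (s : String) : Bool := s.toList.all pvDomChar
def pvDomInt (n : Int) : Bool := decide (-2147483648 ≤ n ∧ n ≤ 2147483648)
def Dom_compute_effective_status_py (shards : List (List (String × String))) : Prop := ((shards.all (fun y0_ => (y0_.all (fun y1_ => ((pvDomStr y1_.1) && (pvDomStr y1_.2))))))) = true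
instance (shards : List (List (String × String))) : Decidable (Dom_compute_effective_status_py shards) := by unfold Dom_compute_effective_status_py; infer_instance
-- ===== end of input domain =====

-- B replaces three counting passes + if-chain by one fold keeping a single maximum severity rank (alternative decomposition).

-- ===== PORT A =====
-- s.get("status") on the association list, first-match semantics
def pvStatusOf (s : List (String × String)) : Option String :=
  (PySem.Dict.mk s).get? "status"

def compute_effective_status_py (shards : List (List (String × String))) : String :=
  let running := shards.foldl (fun acc s => if pvStatusOf s == some "running" then acc + 1 else acc) 0
  let pending := shards.foldl (fun acc s => if pvStatusOf s == some "pending" then acc + 1 else acc) 0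
  let failed := shards.foldl (fun acc s => if pvStatusOf s == some "failed" then acc + 1 else acc) 0
  if running > 0 then "running"
  else if pending > 0 then "pending"
  else if failed > 0 then "failed"
  else "completed"

-- ===== PORT B =====
-- _RANK.get(st, 0): 3-entry dict literal lookup with default, ported as the ordered key comparisons (exact; None/unknown give 0)
def pvRank (st : Option String) : Nat :=
  if st == some "running" then 3
  else if st == some "pending" then 2
  else if st == some "failed" then 1
  else 0

-- _NAME[best]: indexing the 4-tuple literal (best is always 0..3)
def pvName (n : Nat) : String :=
  if n == 0 then "completed"
  else if n == 1 then "failed"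
  else if n == 2 then "pending"
  else "running"

def compute_effective_status_py_alt (shards : List (List (String × String))) : String :=
  let best := shards.foldl (fun best s => max best (pvRank (pvStatusOf s))) 0
  pvName best

-- ===== PRECONDITION & SPEC =====
def Spec_compute_effective_status_py (shards : List (List (String × String))) (out : String) : Prop := out = compute_effective_status_py_alt shards
instance (shards : List (List (String × String))) (out : String) : Decidable (Spec_compute_effective_status_py shards out) := by unfold Spec_compute_effective_status_py; infer_instance

-- ===== CLAIM (what is proved, stated in full; the proofs are below) =====
def Claim_equal_compute_effective_status_py : Prop := ∀ (shards : List (List (String × String))), Dom_compute_effective_status_py shards → Spec_compute_effective_status_py shards (compute_effective_status_py shards)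

-- ===== LEMMAS AND PROOFS =====

-- A's counting loops are countP
theorem count_foldl (p : List (String × String) → Bool) (l : List (List (String × String))) (n : Nat) :
    l.foldl (fun acc s => if p s then acc + 1 else acc) n = n + l.countP p := by
  induction l generalizing n with
  | nil => simp
  | cons a t ih =>
    simp only [List.foldl_cons, List.countP_cons]
    by_cases h : p a <;> simp [h, ih] <;> omega

-- B's max-fold shifts its accumulator out
theorem best_shift (l : List (List (String × String))) (b : Nat) :
    l.foldl (fun best s => max best (pvRank (pvStatusOf s))) b
      = max b (l.foldl (fun best s => max best (pvRank (pvStatusOf s))) 0) := by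
  induction l generalizing b with
  | nil => simp
  | cons a t ih =>
    simp only [List.foldl_cons]
    rw [ih (max b _), ih (max 0 _)]
    omega

-- characterisation of B's maximum by the three counts
theorem best_char (l : List (List (String × String))) :
    l.foldl (fun best s => max best (pvRank (pvStatusOf s))) 0
      = if l.countP (fun s => pvStatusOf s == some "running") > 0 then 3
        else if l.countP (fun s => pvStatusOf s == some "pending") > 0 then 2
        else if l.countP (fun s => pvStatusOf s == some "failed") > 0 then 1
        else 0 := by
  induction l with
  | nil => simp
  | cons a t ih =>
    simp only [List.foldl_cons, List.countP_cons]
    rw [best_shift, ih]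
    unfold pvRank
    by_cases h1 : pvStatusOf a == some "running" <;>
      by_cases h2 : pvStatusOf a == some "pending" <;>
        by_cases h3 : pvStatusOf a == some "failed" <;>
          simp [h1, h2, h3] <;> split_ifs <;> omega

-- ===== VERDICT (by name: the statement is the Claim_ definition above) =====
theorem compute_effective_status_py_spec : Claim_equal_compute_effective_status_py := by
  intro shards _
  unfold Spec_compute_effective_status_py compute_effective_status_py compute_effective_status_py_alt
  rw [best_char, count_foldl, count_foldl, count_foldl]
  simp only [Nat.zero_add]
  split_ifs <;> simp_all [pvName]
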